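-- pv_equiv track=rewrite | github.com/Duncanyu/anagnosis | api/services/agent.py | plan_queries
-- ===== SOURCE A (Python) =====
-- from typing import List, Dict, Any, Tuple
--
-- def plan_queries(question: str, context_hint: str = "", k: int = 3) -> List[str]:
--     if not question:
--         return []
--     base = question.strip()
--     variants = [
--         base,
--         base + " key formulas",
--         base + " canonical definitions",
--         base + " symbols and variables list",
--         "core formulas for " + base,
--     ]
--     out = []
--     for i in range(k):
--         out.append(variants[i % len(variants)])
--     return list(dict.fromkeys(out))
-- ===== SOURCE B (Python) =====
-- def plan_queries(question: str, context_hint: str = "", k: int = 3):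
--     if not question:
--         return []
--     base = question.strip()
--     # the five variants are prefix+base+suffix instances of these templates and are
--     # always pairwise distinct (their lengths differ), so A's modulo loop plus
--     # dict.fromkeys dedup is just a clamped prefix of the instantiated templates
--     templates = [
--         ("", ""),
--         ("", " key formulas"),
--         ("", " canonical definitions"),
--         ("", " symbols and variables list"),
--         ("core formulas for ", ""),
--     ]
--     return [pre + base + suf for pre, suf in templates[:max(0, k)]]
-- ===== Notes on version B (the rewrite author's own statement) =====
-- stated objective: simpler
-- what changed: Instead of materialising the 5 variants, looping i in range(k) with modulo indexing and deduplicating via dict.fromkeys, B keeps a list of (prefix,suffix) templates, slices it to max(0,k) and instantiates each template once; correct because the five instantiated variants always have pairwise distinct lengths, so the cyclic repetition deduplicates to a prefix.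
import Mathlib
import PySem

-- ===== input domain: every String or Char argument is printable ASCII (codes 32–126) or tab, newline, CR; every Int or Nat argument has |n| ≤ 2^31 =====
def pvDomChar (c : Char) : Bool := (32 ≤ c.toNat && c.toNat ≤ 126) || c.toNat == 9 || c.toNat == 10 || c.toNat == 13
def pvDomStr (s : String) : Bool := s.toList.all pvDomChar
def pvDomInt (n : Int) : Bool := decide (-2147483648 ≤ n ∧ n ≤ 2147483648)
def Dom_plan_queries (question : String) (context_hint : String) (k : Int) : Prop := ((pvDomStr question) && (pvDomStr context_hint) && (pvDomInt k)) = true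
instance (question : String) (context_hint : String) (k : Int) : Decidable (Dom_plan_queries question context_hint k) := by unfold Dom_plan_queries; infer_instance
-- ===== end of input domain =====

-- B replaces A's range(k) modulo loop + dict.fromkeys dedup by instantiating a clamped
-- prefix of (prefix,suffix) templates (the five variants are pairwise distinct); objective: simpler.


-- ===== PORT A =====
-- literal port of A: build the 5 variants, loop i in range(k) appending variants[i % len(variants)]
-- (the index i % 5 is always in range, so pyGetD's default is unreachable), then dict.fromkeys dedup.
def plan_queries (question : String) (context_hint : String) (k : Int) : List String :=
  if question = "" then []
  else
    let base := PySem.Str.strip question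
    let variants : List String :=
      [base, base ++ " key formulas", base ++ " canonical definitions",
       base ++ " symbols and variables list", "core formulas for " ++ base]
    let out := (PySem.List.pyRange 0 k 1).foldl
      (fun acc i => acc ++ [PySem.List.pyGetD variants (PySem.Int.mod i (PySem.List.len variants)) ""]) []
    PySem.List.dedup out

-- ===== PORT B =====
-- port of Source B: slice the (prefix, suffix) template list to max(0,k) and instantiate each template.
def plan_queries_alt (question : String) (context_hint : String) (k : Int) : List String :=
  if question = "" then []
  else
    let base := PySem.Str.strip question
    let templates : List (String × String) :=
      [("", ""), ("", " key formulas"), ("", " canonical definitions"),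
       ("", " symbols and variables list"), ("core formulas for ", "")]
    (PySem.List.slice templates none (some (max 0 k))).map (fun t => t.1 ++ base ++ t.2)

-- ===== PRECONDITION & SPEC =====
def Spec_plan_queries (question : String) (context_hint : String) (k : Int) (out : List String) : Prop := out = plan_queries_alt question context_hint k
instance (question : String) (context_hint : String) (k : Int) (out : List String) : Decidable (Spec_plan_queries question context_hint k out) := by unfold Spec_plan_queries; infer_instance

-- ===== CLAIM (what is proved, stated in full; the proofs are below) =====
def Claim_equal_plan_queries : Prop := ∀ (question : String) (context_hint : String) (k : Int), Dom_plan_queries question context_hint k → Spec_plan_queries question context_hint k (plan_queries question context_hint k)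

-- ===== LEMMAS AND PROOFS =====

-- dict.fromkeys of xs ++ [x]: x is dropped iff it already occurred.
lemma dedup_append_singleton (xs : List String) (x : String) :
    PySem.List.dedup (xs ++ [x]) =
      if x ∈ xs then PySem.List.dedup xs else PySem.List.dedup xs ++ [x] := by
  have h : PySem.List.dedup (xs ++ [x]) = PySem.Set.add (PySem.List.dedup xs) x := by
    simp [PySem.List.dedup_eq_ofList, PySem.Set.ofList_eq_foldl, List.foldl_append]
  rw [h]
  by_cases hx : x ∈ xs
  · simp [PySem.Set.add, PySem.Set.contains, hx]
  · simp [PySem.Set.add, PySem.Set.contains, hx]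

-- the core fact: deduplicating the cyclically indexed list of a 5-element Nodup list is its prefix
lemma dedup_cycle (v : List String) (hlen : v.length = 5) (hnd : v.Nodup) (n : Nat) :
    PySem.List.dedup ((List.range n).map (fun j => v.getD (j % 5) "")) = v.take n := by
  induction n with
  | zero => simp [PySem.List.dedup_eq_ofList, PySem.Set.ofList]
  | succ m ih =>
    rw [List.range_succ, List.map_append, List.map_cons, List.map_nil,
        dedup_append_singleton, ih]
    by_cases hm : m < 5
    · have hmv : m < v.length := by omega
      have hget : v.getD (m % 5) "" = v[m] := by
        rw [Nat.mod_eq_of_lt hm]; exact List.getD_eq_getElem v "" hmv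
      have hnotmem : v.getD (m % 5) "" ∉ (List.range m).map (fun j => v.getD (j % 5) "") := by
        intro hmem
        have : v.getD (m % 5) "" ∈ PySem.List.dedup ((List.range m).map (fun j => v.getD (j % 5) "")) :=
          (PySem.List.mem_dedup _ _).2 hmem
        rw [ih] at this
        rw [hget] at this
        obtain ⟨j, hj, hjv⟩ := List.mem_take_iff_getElem.1 this
        have hj' : j < m := by
          have := hj; omega
        have : j = m := (List.Nodup.getElem_inj_iff hnd).1 hjv
        omega
      rw [if_neg hnotmem, hget, List.take_add_one, List.getElem?_eq_getElem hmv]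
      rfl
    · have h5m : 5 ≤ m := by omega
      have hmem : v.getD (m % 5) "" ∈ (List.range m).map (fun j => v.getD (j % 5) "") := by
        refine List.mem_map.2 ⟨m % 5, List.mem_range.2 ?_, ?_⟩
        · have : m % 5 < 5 := Nat.mod_lt _ (by omega)
          omega
        · simp [Nat.mod_mod_of_dvd]
      rw [if_pos hmem]
      rw [List.take_of_length_le (by omega), List.take_of_length_le (by omega)]

-- ===== VERDICT (by name: the statement is the Claim_ definition above) =====
theorem plan_queries_spec : Claim_equal_plan_queries := by
  intro question context_hint k _
  unfold Spec_plan_queries plan_queries plan_queries_alt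
  by_cases hq : question = ""
  · simp [hq]
  · simp only [hq, if_false]
    set base := PySem.Str.strip question with hbase
    set v : List String :=
      [base, base ++ " key formulas", base ++ " canonical definitions",
       base ++ " symbols and variables list", "core formulas for " ++ base] with hv
    set t : List (String × String) :=
      [("", ""), ("", " key formulas"), ("", " canonical definitions"),
       ("", " symbols and variables list"), ("core formulas for ", "")] with ht
    have hmapv : t.map (fun p => p.1 ++ base ++ p.2) = v := by
      simp [ht, hv]
    have hlen : v.length = 5 := by simp [hv]
    have hnd : v.Nodup := by
      apply List.Nodup.of_map (fun s : String => s.length)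
      have h13 : (" key formulas" : String).length = 13 := by decide
      have h22 : (" canonical definitions" : String).length = 22 := by decide
      have h27 : (" symbols and variables list" : String).length = 27 := by decide
      have h18 : ("core formulas for " : String).length = 18 := by decide
      simp [hv, String.length_append]
      omega
    have hslice : PySem.List.slice t none (some (max 0 k)) = t.take (max 0 k).toNat :=
      PySem.List.slice_to t (le_max_left 0 k)
    rw [hslice, List.map_take, hmapv]
    by_cases hk : k ≤ 0
    · have h1 : PySem.List.pyRange 0 k 1 = [] := PySem.List.pyRange_one_eq_nil hk
      have h2 : (max 0 k).toNat = 0 := by omega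
      rw [h1, h2]
      simp [PySem.List.dedup_eq_ofList, PySem.Set.ofList]
    · have hmax : (max 0 k).toNat = k.toNat := by omega
      rw [hmax]
      rw [PySem.List.foldl_append_singleton_eq_map, List.nil_append]
      rw [PySem.List.pyRange_one 0 k, List.map_map]
      have hlenv : PySem.List.len v = (5 : Int) := by simp [PySem.List.len_eq, hlen]
      have hfun : ∀ j ∈ List.range (k - 0).toNat,
          ((fun i => PySem.List.pyGetD v (PySem.Int.mod i (PySem.List.len v)) "") ∘
            (fun j : Nat => (0 : Int) + ↑j)) j = v.getD (j % 5) "" := by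
        intro j _
        simp only [Function.comp, zero_add, hlenv]
        have hmod : PySem.Int.mod (↑j) (5 : Int) = ((j % 5 : Nat) : Int) := by
          exact_mod_cast PySem.Int.mod_natCast j 5
        rw [hmod, PySem.List.pyGetD_natCast]
      rw [List.map_congr_left hfun]
      have : (k - 0).toNat = k.toNat := by omega
      rw [this, dedup_cycle v hlen hnd k.toNat]
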